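-- pv_equiv track=rewrite | github.com/HunterBjj/Python_developer | Pr5/5.5.py | data_search
-- ===== SOURCE A (Python) =====
-- def data_search(data,input_data):
--     for v, k in data.items():
--           if v == input_data:
--             return v,k
--     else:
--         for v, k in data.items():
--           if k == input_data:
--             return v,k
-- ===== SOURCE B (Python) =====
-- def data_search(data, input_data):
--     value_match = None
--     for k, v in data.items():
--         if k == input_data:
--             return k, v
--         if v == input_data and value_match is None:
--             value_match = (k, v)
--     return value_match
-- ===== Notes on version B (the rewrite author's own statement) =====
-- stated objective: simpler
-- what changed: Replaced A's two sequential scans over data.items() (keys first, then values) by a single pass that returns on a key match and remembers the first value match in a candidate variable returned after the loop.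
import Mathlib
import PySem

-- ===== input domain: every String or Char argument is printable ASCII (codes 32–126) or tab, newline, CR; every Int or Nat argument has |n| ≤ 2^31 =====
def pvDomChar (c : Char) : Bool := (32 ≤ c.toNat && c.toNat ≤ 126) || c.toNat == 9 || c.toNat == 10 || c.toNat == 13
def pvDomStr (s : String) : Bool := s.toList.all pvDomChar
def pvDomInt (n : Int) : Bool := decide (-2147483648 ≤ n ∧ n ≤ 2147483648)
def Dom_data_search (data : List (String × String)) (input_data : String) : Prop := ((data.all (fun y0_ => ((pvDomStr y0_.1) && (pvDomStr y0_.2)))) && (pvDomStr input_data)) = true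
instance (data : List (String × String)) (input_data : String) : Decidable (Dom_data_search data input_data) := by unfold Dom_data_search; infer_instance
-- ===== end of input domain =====

-- B collapses A's two sequential scans into one pass that returns on a key match
-- and remembers the first value match; proven equal on all inputs (A is total).


-- ===== PORT A =====
-- first loop: return (k, v) for the first pair whose KEY equals input_data
def dsKeyLoop (l : List (String × String)) (input_data : String) : Option (String × String) :=
  match l with
  | [] => none
  | (v, k) :: rest => if v == input_data then some (v, k) else dsKeyLoop rest input_data

-- second loop (the for-else branch): first pair whose VALUE equals input_data
def dsValLoop (l : List (String × String)) (input_data : String) : Option (String × String) :=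
  match l with
  | [] => none
  | (v, k) :: rest => if k == input_data then some (v, k) else dsValLoop rest input_data

def data_search (data : List (String × String)) (input_data : String) : Option (String × String) :=
  match dsKeyLoop data input_data with
  | some r => some r
  | none => dsValLoop data input_data

-- ===== PORT B =====
-- single pass: return on key match, remember the first value match in `value_match`
def dsGo (l : List (String × String)) (input_data : String) (value_match : Option (String × String)) : Option (String × String) :=
  match l with
  | [] => value_match
  | (k, v) :: rest =>
    if k == input_data then some (k, v)
    else dsGo rest input_data
      (if v == input_data && value_match.isNone then some (k, v) else value_match)

def data_search_alt (data : List (String × String)) (input_data : String) : Option (String × String) :=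
  dsGo data input_data none

-- ===== PRECONDITION & SPEC =====
def Spec_data_search (data : List (String × String)) (input_data : String) (out : Option (String × String)) : Prop := out = data_search_alt data input_data
instance (data : List (String × String)) (input_data : String) (out : Option (String × String)) : Decidable (Spec_data_search data input_data out) := by unfold Spec_data_search; infer_instance

-- ===== CLAIM (what is proved, stated in full; the proofs are below) =====
def Claim_equal_data_search : Prop := ∀ (data : List (String × String)) (input_data : String), Dom_data_search data input_data → Spec_data_search data input_data (data_search data input_data)

-- ===== LEMMAS AND PROOFS =====
theorem dsGo_eq (l : List (String × String)) (inp : String) (cand : Option (String × String)) :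
    dsGo l inp cand =
      match dsKeyLoop l inp with
      | some r => some r
      | none => match cand with
        | some c => some c
        | none => dsValLoop l inp := by
  induction l generalizing cand with
  | nil => cases cand <;> simp [dsGo, dsKeyLoop, dsValLoop]
  | cons p rest ih =>
    obtain ⟨k, v⟩ := p
    by_cases hk : k == inp
    · simp [dsGo, dsKeyLoop, hk]
    · simp only [dsGo, dsKeyLoop, dsValLoop, hk, Bool.false_eq_true, ite_false]
      rw [ih]
      cases cand <;> by_cases hv : v == inp <;> simp [hv]

-- ===== VERDICT (by name: the statement is the Claim_ definition above) =====
theorem data_search_spec : Claim_equal_data_search := by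
  intro data input_data _
  unfold Spec_data_search data_search_alt
  rw [dsGo_eq]
  unfold data_search
  cases dsKeyLoop data input_data <;> simp
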